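-- pv_equiv track=rewrite | github.com/obris/TextReader | TextReader.py | extraire_mots_et_comparer
-- ===== SOURCE A (Python) =====
-- def extraire_mots_et_comparer(texte, dictionnaire, stopwords):
--     mots = texte.split()
--     resultat = []
--     mots_vus = set()
--
--     for mot in mots:
--         mot_nettoye = ''.join(char for char in mot if char.isalpha())  # Enlever la ponctuation
--         mot_lower = mot_nettoye.lower()
--         if mot_lower and mot_lower not in mots_vus and mot_lower not in stopwords:
--             mots_vus.add(mot_lower)
--             if mot_lower in dictionnaire:
--                 valeur_1, valeur_2 = dictionnaire[mot_lower]
--                 resultat.append((mot_lower, valeur_1, valeur_2))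
--             else:
--                 resultat.append((mot_lower, "unbekannt", "unbekannt"))
--     return resultat
-- ===== SOURCE B (Python) =====
-- def extraire_mots_et_comparer(texte, dictionnaire, stopwords):
--     # Different strategy: dedup with an UNORDERED set, then recover the original
--     # first-occurrence order by SORTING on each word's first index in the cleaned list.
--     cleaned = [''.join(c for c in tok if c.isalpha()).lower() for tok in texte.split()]
--     cands = {w for w in cleaned if w and w not in stopwords}
--     resultat = []
--     for mot in sorted(cands, key=cleaned.index):
--         if mot in dictionnaire:
--             v1, v2 = dictionnaire[mot]
--             resultat.append((mot, v1, v2))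
--         else:
--             resultat.append((mot, "unbekannt", "unbekannt"))
--     return resultat
-- ===== Notes on version B (the rewrite author's own statement) =====
-- stated objective: alternative
-- what changed: A streams once over the tokens carrying a seen-set to dedup in order; B instead collects the admissible cleaned words into an unordered set and recovers the first-occurrence order by sorting the set on each word's first index (list.index) in the cleaned list, then annotates.
import Mathlib
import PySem

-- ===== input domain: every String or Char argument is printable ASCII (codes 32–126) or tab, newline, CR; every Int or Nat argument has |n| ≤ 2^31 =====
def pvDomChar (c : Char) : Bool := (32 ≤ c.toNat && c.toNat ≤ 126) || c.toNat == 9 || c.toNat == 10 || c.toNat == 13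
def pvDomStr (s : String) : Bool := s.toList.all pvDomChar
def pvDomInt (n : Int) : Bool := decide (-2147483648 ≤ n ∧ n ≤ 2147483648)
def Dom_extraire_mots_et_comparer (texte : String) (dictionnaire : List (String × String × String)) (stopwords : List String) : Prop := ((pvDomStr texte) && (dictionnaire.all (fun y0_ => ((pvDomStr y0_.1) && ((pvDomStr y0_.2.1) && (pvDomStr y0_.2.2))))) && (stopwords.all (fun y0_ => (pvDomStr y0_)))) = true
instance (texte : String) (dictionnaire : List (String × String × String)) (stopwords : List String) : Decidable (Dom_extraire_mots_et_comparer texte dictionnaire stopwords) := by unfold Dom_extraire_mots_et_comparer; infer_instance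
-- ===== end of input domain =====

-- B replaces A's order-preserving streaming dedup (seen-set carried through one loop) by an
-- unordered set of candidate words whose original first-occurrence order is RECOVERED BY SORTING
-- on each word's first index (list.index) — objective: alternative algorithm, same result.

-- ===== PORT A =====
def extraire_mots_et_comparer (texte : String) (dictionnaire : List (String × String × String)) (stopwords : List String) : List (String × String × String) :=
  let mots := PySem.Str.split₀ texte
  let final := mots.foldl (fun (st : List (String × String × String) × PySem.Set String) mot =>
    let mot_nettoye := String.mk (mot.toList.filter PySem.Str.isalpha)
    let mot_lower := PySem.Str.lower mot_nettoye
    if mot_lower ≠ "" ∧ mot_lower ∉ st.2 ∧ mot_lower ∉ stopwords then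
      match dictionnaire.lookup mot_lower with
      | some (valeur_1, valeur_2) =>
          (st.1 ++ [(mot_lower, valeur_1, valeur_2)], PySem.Set.add st.2 mot_lower)
      | none =>
          (st.1 ++ [(mot_lower, "unbekannt", "unbekannt")], PySem.Set.add st.2 mot_lower)
    else st) ([], PySem.Set.empty)
  final.1

-- ===== PORT B =====
-- 'cleaned.index mot' is ported as 'cleaned.idxOf mot': exact here because every candidate word
-- is drawn from 'cleaned', so Python's list.index never raises and returns the first index.
def extraire_mots_et_comparer_alt (texte : String) (dictionnaire : List (String × String × String)) (stopwords : List String) : List (String × String × String) :=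
  let cleaned := (PySem.Str.split₀ texte).map
    (fun tok => PySem.Str.lower (String.mk (tok.toList.filter PySem.Str.isalpha)))
  let cands := PySem.Set.ofList (cleaned.filter (fun w => decide (w ≠ "" ∧ w ∉ stopwords)))
  (PySem.List.sorted cands (fun w => cleaned.idxOf w)).map (fun mot =>
    match dictionnaire.lookup mot with
    | some (v1, v2) => (mot, v1, v2)
    | none => (mot, "unbekannt", "unbekannt"))

-- ===== PRECONDITION & SPEC =====
def Spec_extraire_mots_et_comparer (texte : String) (dictionnaire : List (String × String × String)) (stopwords : List String) (out : List (String × String × String)) : Prop := out = extraire_mots_et_comparer_alt texte dictionnaire stopwords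
instance (texte : String) (dictionnaire : List (String × String × String)) (stopwords : List String) (out : List (String × String × String)) : Decidable (Spec_extraire_mots_et_comparer texte dictionnaire stopwords out) := by unfold Spec_extraire_mots_et_comparer; infer_instance

-- ===== CLAIM (what is proved, stated in full; the proofs are below) =====
def Claim_equal_extraire_mots_et_comparer : Prop := ∀ (texte : String) (dictionnaire : List (String × String × String)) (stopwords : List String), Dom_extraire_mots_et_comparer texte dictionnaire stopwords → Spec_extraire_mots_et_comparer texte dictionnaire stopwords (extraire_mots_et_comparer texte dictionnaire stopwords)

-- ===== LEMMAS AND PROOFS =====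

-- the annotation of one word (shared shape of both ports' emit step)
def pvEmit (dictionnaire : List (String × String × String)) (mot : String) : String × String × String :=
  match dictionnaire.lookup mot with
  | some (v1, v2) => (mot, v1, v2)
  | none => (mot, "unbekannt", "unbekannt")

-- A's loop body, named for the proof
def pvStep (dictionnaire : List (String × String × String)) (stopwords : List String)
    (st : List (String × String × String) × PySem.Set String) (mot : String) :
    List (String × String × String) × PySem.Set String :=
  let mot_nettoye := String.mk (mot.toList.filter PySem.Str.isalpha)
  let mot_lower := PySem.Str.lower mot_nettoye
  if mot_lower ≠ "" ∧ mot_lower ∉ st.2 ∧ mot_lower ∉ stopwords then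
    match dictionnaire.lookup mot_lower with
    | some (valeur_1, valeur_2) =>
        (st.1 ++ [(mot_lower, valeur_1, valeur_2)], PySem.Set.add st.2 mot_lower)
    | none =>
        (st.1 ++ [(mot_lower, "unbekannt", "unbekannt")], PySem.Set.add st.2 mot_lower)
  else st

lemma pyset_foldl_add_prefix (l : List String) (s : PySem.Set String) :
    ∃ t, l.foldl PySem.Set.add s = s ++ t := by
  induction l generalizing s with
  | nil => exact ⟨[], by simp⟩
  | cons x l ih =>
    by_cases hx : x ∈ s
    · rcases ih s with ⟨t, ht⟩
      exact ⟨t, by simp [List.foldl_cons, PySem.Set.add, hx, ht]⟩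
    · rcases ih (s ++ [x]) with ⟨t, ht⟩
      exact ⟨x :: t, by simp [List.foldl_cons, PySem.Set.add, hx, ht]⟩

lemma pvLoopSpec (d : List (String × String × String)) (sw : List String)
    (ws : List String) (res : List (String × String × String)) (vus : PySem.Set String) :
    ws.foldl (pvStep d sw) (res, vus) =
      (res ++ ((((ws.map (fun tok => PySem.Str.lower (String.mk (tok.toList.filter PySem.Str.isalpha)))).filter
          (fun w => decide (w ≠ "" ∧ w ∉ sw))).foldl PySem.Set.add vus).drop vus.length).map (pvEmit d),
       ((ws.map (fun tok => PySem.Str.lower (String.mk (tok.toList.filter PySem.Str.isalpha)))).filter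
          (fun w => decide (w ≠ "" ∧ w ∉ sw))).foldl PySem.Set.add vus) := by
  induction ws generalizing res vus with
  | nil => simp
  | cons m ms ih =>
    set w := PySem.Str.lower (String.mk (m.toList.filter PySem.Str.isalpha)) with hw
    by_cases hP : w ≠ "" ∧ w ∉ sw
    · by_cases hv : w ∈ vus
      · -- passes the filter but already seen: A skips, Set.add is a no-op
        have hstep : pvStep d sw (res, vus) m = (res, vus) := by
          simp [pvStep, ← hw, hv]
        have hadd : PySem.Set.add vus w = vus := by
          simp [PySem.Set.add, hv]
        rw [List.foldl_cons, hstep, ih]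
        simp [← hw, hP.1, hP.2, hadd]
      · -- new word: A emits it, Set.add appends it
        have hstep : pvStep d sw (res, vus) m = (res ++ [pvEmit d w], PySem.Set.add vus w) := by
          simp only [pvStep, ← hw]
          rw [if_pos ⟨hP.1, hv, hP.2⟩]
          unfold pvEmit
          cases d.lookup w with
          | none => simp
          | some p => cases p; simp
        have hadd : PySem.Set.add vus w = vus ++ [w] := by
          simp [PySem.Set.add, hv]
        rw [List.foldl_cons, hstep, ih]
        rcases pyset_foldl_add_prefix
            ((ms.map (fun tok => PySem.Str.lower (String.mk (tok.toList.filter PySem.Str.isalpha)))).filter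
              (fun w => decide (w ≠ "" ∧ w ∉ sw))) (vus ++ [w]) with ⟨t, ht⟩
        simp only [← hw, List.map_cons, List.filter_cons]
        rw [if_pos (by simp [hP.1, hP.2])]
        simp only [List.foldl_cons]
        rw [Prod.ext_iff]
        refine ⟨?_, rfl⟩
        rw [hadd, ht]
        have h1 : (vus ++ [w] ++ t).drop vus.length = w :: t := by
          rw [List.append_assoc, List.drop_left]
          rfl
        have h2 : (vus ++ [w] ++ t).drop (vus ++ [w]).length = t := List.drop_left
        rw [h1, h2]
        simp
    · -- fails the filter: both sides skip the word
      have hstep : pvStep d sw (res, vus) m = (res, vus) := by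
        simp only [pvStep, ← hw]
        rw [if_neg]
        intro ⟨h1, _, h3⟩
        exact hP ⟨h1, h3⟩
      rw [List.foldl_cons, hstep, ih]
      simp [← hw, hP]

-- B's sort key: the set of first occurrences of the filtered words is strictly increasing
-- under 'first index in xs', so sorting by it reproduces first-occurrence order.
lemma pvPairwiseIdx (xs : List String) (P : String → Bool) :
    (PySem.Set.ofList (xs.filter P)).Pairwise (fun a b => xs.idxOf a < xs.idxOf b) := by
  induction xs with
  | nil => simp [PySem.Set.ofList]
  | cons x xs ih =>
    by_cases hP : P x
    · rw [List.filter_cons_of_pos hP, PySem.Set.ofList_cons]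
      constructor
      · intro y hy
        have hyx : y ≠ x := by
          have := hy
          simp [PySem.Set.discard] at this
          exact this.2
        rw [List.idxOf_cons_self, List.idxOf_cons_ne xs (Ne.symm hyx)]
        omega
      · have hpw : (PySem.Set.discard (PySem.Set.ofList (xs.filter P)) x).Pairwise
            (fun a b => xs.idxOf a < xs.idxOf b) := List.Pairwise.filter _ ih
        refine hpw.imp_of_mem ?_
        intro a b ha hb hab
        have hax : a ≠ x := by
          simp [PySem.Set.discard] at ha; exact ha.2
        have hbx : b ≠ x := by
          simp [PySem.Set.discard] at hb; exact hb.2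
        rw [List.idxOf_cons_ne xs (Ne.symm hax), List.idxOf_cons_ne xs (Ne.symm hbx)]
        omega
    · rw [List.filter_cons_of_neg hP]
      refine ih.imp_of_mem ?_
      intro a b ha hb hab
      have haP : P a := by
        have := (PySem.Set.mem_ofList _ _).mp ha
        exact (List.mem_filter.mp this).2
      have hbP : P b := by
        have := (PySem.Set.mem_ofList _ _).mp hb
        exact (List.mem_filter.mp this).2
      have hax : a ≠ x := fun h => hP (h ▸ haP)
      have hbx : b ≠ x := fun h => hP (h ▸ hbP)
      rw [List.idxOf_cons_ne xs (Ne.symm hax), List.idxOf_cons_ne xs (Ne.symm hbx)]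
      omega

-- ===== VERDICT (by name: the statement is the Claim_ definition above) =====
theorem extraire_mots_et_comparer_spec : Claim_equal_extraire_mots_et_comparer := by
  intro texte d sw _
  show extraire_mots_et_comparer texte d sw = extraire_mots_et_comparer_alt texte d sw
  have hA : extraire_mots_et_comparer texte d sw =
      ((PySem.Str.split₀ texte).foldl (pvStep d sw) ([], PySem.Set.empty)).1 := rfl
  set cleaned := (PySem.Str.split₀ texte).map
    (fun tok => PySem.Str.lower (String.mk (tok.toList.filter PySem.Str.isalpha))) with hcl
  have hsort : PySem.List.sorted
      (PySem.Set.ofList (cleaned.filter (fun w => decide (w ≠ "" ∧ w ∉ sw))))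
      (fun w => cleaned.idxOf w) =
      PySem.Set.ofList (cleaned.filter (fun w => decide (w ≠ "" ∧ w ∉ sw))) :=
    PySem.List.sorted_eq_of_perm_of_pairwise_lt _ _ _ (List.Perm.refl _)
      (pvPairwiseIdx cleaned _)
  rw [hA, pvLoopSpec]
  simp only [extraire_mots_et_comparer_alt, ← hcl, hsort]
  simp [PySem.Set.ofList_eq_foldl, PySem.Set.empty, pvEmit]
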